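-- pv_equiv track=rewrite | github.com/DmitriyGordeev/python_params_grid_search | src/gridutils.py | space_step
-- ===== SOURCE A (Python) =====
-- def space_step(min_value, max_value, step):
--     """
--     Creates equally distributred values between intervals
--     :param min_value:
--     :param max_value:
--     :param step:
--     :return:
--     """
--     if min_value > max_value:
--         raise ValueError("min_value > max_value")
--
--     if step <= 0:
--         raise ValueError("step <= 0")
--
--     out_array = []
--     last = min_value
--     while last < max_value:
--         out_array.append(last)
--         last = last + step
--     out_array.append(max_value)
--     out_array = list(dict.fromkeys(out_array))
--     out_array.sort()
--     return out_array
-- ===== SOURCE B (Python) =====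
-- def space_step(min_value, max_value, step):
--     if min_value > max_value:
--         raise ValueError("min_value > max_value")
--     if step <= 0:
--         raise ValueError("step <= 0")
--     # number of stepped values strictly below max_value: ceil((max-min)/step)
--     n = -((min_value - max_value) // step)
--     return [min_value + i * step for i in range(n)] + [max_value]
-- ===== Notes on version B (the rewrite author's own statement) =====
-- stated objective: simpler
-- what changed: B replaces the while-loop accumulation followed by dict.fromkeys dedup and sort with a single closed-form list comprehension: it computes the number of stepped values n = ceil((max-min)/step) by integer ceiling division and returns [min+i*step for i in range(n)] + [max], dropping the dedup and sort which are provably no-ops on the strictly increasing output.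
import Mathlib
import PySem

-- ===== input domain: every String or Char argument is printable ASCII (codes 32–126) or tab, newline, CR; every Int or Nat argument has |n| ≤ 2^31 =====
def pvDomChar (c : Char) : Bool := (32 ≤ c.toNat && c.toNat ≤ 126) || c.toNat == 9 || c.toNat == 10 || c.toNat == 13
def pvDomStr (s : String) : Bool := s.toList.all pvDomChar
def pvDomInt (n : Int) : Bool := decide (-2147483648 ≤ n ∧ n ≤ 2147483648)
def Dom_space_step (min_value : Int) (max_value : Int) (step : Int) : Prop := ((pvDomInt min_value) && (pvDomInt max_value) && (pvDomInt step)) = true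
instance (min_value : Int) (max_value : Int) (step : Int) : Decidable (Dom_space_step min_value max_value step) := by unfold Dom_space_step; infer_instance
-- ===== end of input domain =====

-- B replaces A's while-loop + dict.fromkeys dedup + sort by a closed-form comprehension
-- (n = ceil((max-min)/step) values, then max appended); objective: simpler.


-- ===== PORT A =====
-- the while loop `while last < max_value: append(last); last += step`;
-- the `0 < step` conjunct is a totality guard only (Python raises before reaching the loop when step ≤ 0)
def spaceLoopA (max_value : Int) (step : Int) (last : Int) (acc : List Int) : List Int :=
  if h : last < max_value ∧ 0 < step then
    spaceLoopA max_value step (last + step) (acc ++ [last])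
  else acc
termination_by (max_value - last).toNat
decreasing_by omega

def space_step (min_value : Int) (max_value : Int) (step : Int) : List Int :=
  if min_value > max_value then []        -- Python raises ValueError here (excluded by Pre_)
  else if step ≤ 0 then []                -- Python raises ValueError here (excluded by Pre_)
  else
    let out_array := spaceLoopA max_value step min_value []
    let out_array := out_array ++ [max_value]
    let out_array := PySem.List.dedup out_array      -- list(dict.fromkeys(out_array))
    PySem.List.sorted out_array (fun x => x) false   -- out_array.sort()

-- ===== PORT B =====
def space_step_alt (min_value : Int) (max_value : Int) (step : Int) : List Int :=
  if min_value > max_value then []        -- Python raises ValueError here (excluded by Pre_)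
  else if step ≤ 0 then []                -- Python raises ValueError here (excluded by Pre_)
  else
    let n := -(PySem.Int.floordiv (min_value - max_value) step)
    (PySem.List.pyRange 0 n 1).map (fun i => min_value + i * step) ++ [max_value]

-- ===== PRECONDITION & SPEC =====
-- Pre_ excludes exactly the inputs on which the Python A raises ValueError.
def Pre_space_step (min_value : Int) (max_value : Int) (step : Int) : Prop :=
  min_value ≤ max_value ∧ 0 < step
instance (min_value : Int) (max_value : Int) (step : Int) : Decidable (Pre_space_step min_value max_value step) := by unfold Pre_space_step; infer_instance
def pvWitness_space_step : Int × Int × Int := (0, 10, 3)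

def Spec_space_step (min_value : Int) (max_value : Int) (step : Int) (out : List Int) : Prop := out = space_step_alt min_value max_value step
instance (min_value : Int) (max_value : Int) (step : Int) (out : List Int) : Decidable (Spec_space_step min_value max_value step out) := by unfold Spec_space_step; infer_instance

-- ===== CLAIM (what is proved, stated in full; the proofs are below) =====
def Claim_equal_space_step : Prop := ∀ (min_value : Int) (max_value : Int) (step : Int), Dom_space_step min_value max_value step → Pre_space_step min_value max_value step → Spec_space_step min_value max_value step (space_step min_value max_value step)

-- ===== LEMMAS AND PROOFS =====

-- the loop appends exactly the ceil((max-last)/step) values last, last+step, …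
theorem spaceLoopA_eq (max_value step : Int) (hs : 0 < step) :
    ∀ last acc, spaceLoopA max_value step last acc =
      acc ++ (PySem.List.pyRange 0 (-(PySem.Int.floordiv (last - max_value) step)) 1).map
        (fun i => last + i * step) := by
  intro last acc
  induction last, acc using spaceLoopA.induct max_value step with
  | case1 last acc h ih =>
    rw [spaceLoopA, dif_pos h]
    rw [ih]
    have hlt : last < max_value := h.1
    have hne : step ≠ 0 := by omega
    have hfd : PySem.Int.floordiv (last + step - max_value) step
        = PySem.Int.floordiv (last - max_value) step + 1 := by
      rw [PySem.Int.floordiv_eq_ediv_of_pos hs, PySem.Int.floordiv_eq_ediv_of_pos hs]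
      have h2 := Int.add_mul_ediv_right (last - max_value) 1 hne
      have h3 : last + step - max_value = last - max_value + 1 * step := by ring
      rw [h3, h2]
    have hneg : (last - max_value) / step < 0 := Int.ediv_neg_of_neg_of_pos (by omega) hs
    have hn : 0 < -(PySem.Int.floordiv (last - max_value) step) := by
      rw [PySem.Int.floordiv_eq_ediv_of_pos hs]; omega
    rw [hfd]
    rw [PySem.List.pyRange_one_cons hn]
    simp only [PySem.List.pyRange_one, List.map_map, List.map_cons, List.append_assoc,
      List.cons_append, List.nil_append, zero_mul, add_zero]
    have harg : (-(PySem.Int.floordiv (last - max_value) step + 1) - 0).toNat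
        = (-PySem.Int.floordiv (last - max_value) step - (0 + 1)).toNat := by omega
    rw [harg]
    congr 1
    congr 1
    apply List.map_congr_left
    intro k _
    simp only [Function.comp]
    ring
  | case2 last acc h =>
    rw [spaceLoopA, dif_neg h]
    have hge : max_value ≤ last := by omega
    have h0 : 0 ≤ (last - max_value) / step := Int.ediv_nonneg (by omega) (by omega)
    have hle : -(PySem.Int.floordiv (last - max_value) step) ≤ 0 := by
      rw [PySem.Int.floordiv_eq_ediv_of_pos hs]; omega
    rw [PySem.List.pyRange_one_eq_nil hle]
    simp

theorem space_step_spec : Claim_equal_space_step := by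
  unfold Claim_equal_space_step
  intro mn mx st _ hpre
  obtain ⟨hle, hs⟩ := hpre
  unfold Spec_space_step
  have hA : space_step mn mx st
      = PySem.List.sorted
          (PySem.List.dedup (spaceLoopA mx st mn [] ++ [mx])) (fun x => x) false := by
    unfold space_step
    rw [if_neg (by omega), if_neg (by omega)]
  have hB : space_step_alt mn mx st
      = (PySem.List.pyRange 0 (-(PySem.Int.floordiv (mn - mx) st)) 1).map
          (fun i => mn + i * st) ++ [mx] := by
    unfold space_step_alt
    rw [if_neg (by omega), if_neg (by omega)]
  rw [hA, hB, spaceLoopA_eq mx st hs mn []]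
  simp only [List.nil_append]
  -- the list B builds is strictly increasing
  have hkey : mn - mx < ((mn - mx) / st + 1) * st := Int.lt_ediv_add_one_mul_self (mn - mx) hs
  have hub : ∀ i : Int, 0 ≤ i → i < -(PySem.Int.floordiv (mn - mx) st) → mn + i * st < mx := by
    intro i _ hi
    rw [PySem.Int.floordiv_eq_ediv_of_pos hs] at hi
    have h1 : i ≤ -((mn - mx) / st) - 1 := by omega
    have h2 : i * st ≤ (-((mn - mx) / st) - 1) * st :=
      mul_le_mul_of_nonneg_right h1 (by omega)
    have h3 : (-((mn - mx) / st) - 1) * st = -(((mn - mx) / st + 1) * st) := by ring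
    omega
  have hpw : ((PySem.List.pyRange 0 (-(PySem.Int.floordiv (mn - mx) st)) 1).map
      (fun i => mn + i * st) ++ [mx]).Pairwise (· < ·) := by
    apply List.pairwise_append.mpr
    refine ⟨?_, by simp, ?_⟩
    · exact (PySem.List.pairwise_lt_pyRange_one (a := 0)
        (b := -(PySem.Int.floordiv (mn - mx) st))).map _
        (fun a b hab => by nlinarith [mul_lt_mul_of_pos_right hab hs])
    · intro x hx y hy
      simp only [List.mem_singleton] at hy
      subst hy
      obtain ⟨i, hi, rfl⟩ := List.mem_map.mp hx
      obtain ⟨h0, hiu⟩ := (PySem.List.mem_pyRange_one).mp hi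
      exact hub i h0 hiu
  have hnd : ((PySem.List.pyRange 0 (-(PySem.Int.floordiv (mn - mx) st)) 1).map
      (fun i => mn + i * st) ++ [mx]).Nodup := hpw.imp (fun h => ne_of_lt h)
  rw [PySem.List.dedup_eq_ofList]
  rw [PySem.Set.ofList_eq_self_of_nodup _ hnd]
  exact PySem.List.sorted_eq_self_of_pairwise _ _ (hpw.imp (fun h => le_of_lt h))
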